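-- pv_equiv track=rewrite | github.com/eomjunghyun/python-rand-nla-research | src/common.py | _canonical_edge
-- ===== SOURCE A (Python) =====
-- from typing import Any, Callable, Dict, Iterable, List, Optional, Sequence, Tuple
--
-- Edge = Tuple[int, ...]
--
-- def _canonical_edge(edge: Sequence[int]) -> Edge:
--     """Return tuple(sorted(edge)) and reject duplicate vertices."""
--     vertices = []
--     for raw_v in edge:
--         try:
--             v = int(raw_v)
--         except (TypeError, ValueError) as exc:
--             raise ValueError(f"Hyperedge vertex must be an integer, got {raw_v!r}.") from exc
--         if v != raw_v:
--             raise ValueError(f"Hyperedge vertex must be an integer, got {raw_v!r}.")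
--         vertices.append(v)
--
--     if len(vertices) != len(set(vertices)):
--         raise ValueError(f"Hyperedge contains duplicate vertices: {edge}.")
--     return tuple(sorted(vertices))
-- ===== SOURCE B (Python) =====
-- def _canonical_edge(edge):
--     """Return tuple(sorted(edge)) and reject duplicate vertices."""
--
--     def _insert(sorted_vs, v):
--         # insert v into the strictly increasing list sorted_vs; duplicates raise
--         if not sorted_vs:
--             return [v]
--         head = sorted_vs[0]
--         if v < head:
--             return [v] + sorted_vs
--         if v == head:
--             raise ValueError(f"Hyperedge contains duplicate vertices: {edge}.")
--         return [head] + _insert(sorted_vs[1:], v)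
--
--     result = []
--     for raw_v in edge:
--         try:
--             v = int(raw_v)
--         except (TypeError, ValueError) as exc:
--             raise ValueError(f"Hyperedge vertex must be an integer, got {raw_v!r}.") from exc
--         if v != raw_v:
--             raise ValueError(f"Hyperedge vertex must be an integer, got {raw_v!r}.")
--         result = _insert(result, v)
--     return tuple(result)
-- ===== Notes on version B (the rewrite author's own statement) =====
-- stated objective: alternative
-- what changed: B builds the result incrementally by ordered insertion into a strictly increasing list, detecting a duplicate the moment the inserted vertex hits an equal element, so there is no separate sort call and no set at all; A validates, builds a set for the cardinality check, then sorts.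
import Mathlib
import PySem

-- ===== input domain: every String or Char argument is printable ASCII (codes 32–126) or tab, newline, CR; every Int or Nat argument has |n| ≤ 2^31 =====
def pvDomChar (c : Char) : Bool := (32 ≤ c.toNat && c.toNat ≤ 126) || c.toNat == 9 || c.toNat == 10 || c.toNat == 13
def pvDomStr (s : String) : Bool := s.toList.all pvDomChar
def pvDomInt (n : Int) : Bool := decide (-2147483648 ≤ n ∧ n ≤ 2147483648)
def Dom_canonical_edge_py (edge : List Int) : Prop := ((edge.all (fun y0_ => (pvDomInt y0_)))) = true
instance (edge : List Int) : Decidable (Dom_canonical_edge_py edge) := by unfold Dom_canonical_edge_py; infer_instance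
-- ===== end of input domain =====

-- B replaces A's validate-then-set-cardinality-check-then-sort staging with a single
-- pass of ordered insertion into a strictly increasing list that detects a duplicate at
-- the insertion point (no sort call, no set); objective: alternative.

-- ===== PORT A =====
-- On Int inputs int(raw_v) == raw_v always holds, so the validation loop just copies
-- the list; the duplicate check raises ValueError (excluded by Pre_; [] stands for the
-- never-reached raise path on admitted inputs).
def canonical_edge_py (edge : List Int) : List Int :=
  let vertices := edge.foldl (fun acc v => acc ++ [v]) []
  if vertices.length ≠ (PySem.Set.ofList vertices).length then []
  else PySem.List.sorted vertices (fun x => x) false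

-- ===== PORT B =====
-- Source B's recursive _insert: none = the duplicate ValueError raise path
def pvInsert (sorted_vs : List Int) (v : Int) : Option (List Int) :=
  match sorted_vs with
  | [] => some [v]
  | head :: t =>
      if v < head then some (v :: head :: t)
      else if v == head then none
      else (pvInsert t v).map (fun r => head :: r)

def canonical_edge_py_alt (edge : List Int) : List Int :=
  let result := edge.foldl
    (fun acc v => match acc with
      | none => none
      | some l => pvInsert l v) (some [])
  result.getD []   -- none = the raise path, never reached on admitted inputs

-- ===== PRECONDITION & SPEC =====
-- Pre_ excludes exactly the inputs on which A raises ValueError: lists with duplicates.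
def Pre_canonical_edge_py (edge : List Int) : Prop := edge.Nodup
instance (edge : List Int) : Decidable (Pre_canonical_edge_py edge) := by unfold Pre_canonical_edge_py; infer_instance
def pvWitness_canonical_edge_py : List Int := [3, 1, 2]

def Spec_canonical_edge_py (edge : List Int) (out : List Int) : Prop := out = canonical_edge_py_alt edge
instance (edge : List Int) (out : List Int) : Decidable (Spec_canonical_edge_py edge out) := by unfold Spec_canonical_edge_py; infer_instance

-- ===== CLAIM (what is proved, stated in full; the proofs are below) =====
def Claim_equal_canonical_edge_py : Prop := ∀ (edge : List Int), Dom_canonical_edge_py edge → Pre_canonical_edge_py edge → Spec_canonical_edge_py edge (canonical_edge_py edge)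

-- ===== LEMMAS AND PROOFS =====
lemma pv_foldl_app (l acc : List Int) : l.foldl (fun a v => a ++ [v]) acc = acc ++ l := by
  induction l generalizing acc with
  | nil => simp
  | cons x t ih => simp [List.foldl, ih]

-- inserting a fresh element into a strictly increasing list succeeds and stays so
lemma pvInsert_spec (l : List Int) (v : Int) (hs : l.Pairwise (· < ·)) (hv : v ∉ l) :
    ∃ r, pvInsert l v = some r ∧ r.Perm (v :: l) ∧ r.Pairwise (· < ·) := by
  induction l with
  | nil => exact ⟨[v], rfl, List.Perm.refl _, by simp⟩
  | cons h t ih =>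
      by_cases hlt : v < h
      · refine ⟨v :: h :: t, by simp [pvInsert, hlt], List.Perm.refl _, ?_⟩
        refine List.pairwise_cons.mpr ⟨?_, hs⟩
        intro b hb
        rcases List.mem_cons.mp hb with hb | hb
        · omega
        · have := (List.pairwise_cons.mp hs).1 b hb; omega
      · have hne : v ≠ h := fun he => hv (he ▸ List.mem_cons_self ..)
        have ht : t.Pairwise (· < ·) := (List.pairwise_cons.mp hs).2
        obtain ⟨r, hr, hperm, hrs⟩ := ih ht (fun hm => hv (List.mem_cons_of_mem _ hm))
        refine ⟨h :: r, by simp [pvInsert, hlt, hne, hr], ?_, ?_⟩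
        · exact (hperm.cons h).trans (List.Perm.swap v h t)
        · refine List.pairwise_cons.mpr ⟨?_, hrs⟩
          intro b hb
          have hb' : b = v ∨ b ∈ t := by simpa using hperm.mem_iff.mp hb
          rcases hb' with rfl | hb'
          · omega
          · exact (List.pairwise_cons.mp hs).1 b hb'

-- invariant for Source B's main loop: fold of pvInsert over a fresh suffix keeps a
-- strictly increasing permutation of everything seen so far
lemma pv_foldl_insert (edge : List Int) : ∀ (acc : List Int), acc.Pairwise (· < ·) →
    (acc ++ edge).Nodup →
    ∃ r, edge.foldl
        (fun a v => match a with | none => none | some l => pvInsert l v) (some acc) = some r ∧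
      r.Perm (acc ++ edge) ∧ r.Pairwise (· < ·) := by
  induction edge with
  | nil => exact fun acc hs _ => ⟨acc, rfl, by simp, hs⟩
  | cons v t ih =>
      intro acc hs hnd
      have hvacc : v ∉ acc := by
        intro hm
        exact (List.disjoint_of_nodup_append hnd) hm (List.mem_cons_self ..)
      obtain ⟨m, hm, hmp, hms⟩ := pvInsert_spec acc v hs hvacc
      have hmid : (v :: (acc ++ t)).Perm (acc ++ v :: t) :=
        (List.perm_middle (a := v) (l₁ := acc) (l₂ := t)).symm
      have hma : (m ++ t).Perm (acc ++ v :: t) := by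
        refine List.Perm.trans ?_ hmid
        simpa using (hmp.append_right t)
      have hnd' : (m ++ t).Nodup := hma.symm.nodup hnd
      obtain ⟨r, hr, hrp, hrs⟩ := ih m hms hnd'
      exact ⟨r, by simpa [hm] using hr, hrp.trans hma, hrs⟩

-- ===== VERDICT (by name: the statement is the Claim_ definition above) =====
theorem canonical_edge_py_spec : Claim_equal_canonical_edge_py := by
  intro edge _ hpre
  unfold Pre_canonical_edge_py at hpre
  unfold Spec_canonical_edge_py canonical_edge_py canonical_edge_py_alt
  simp only [pv_foldl_app, List.nil_append]
  obtain ⟨r, hr, hrp, hrs⟩ := pv_foldl_insert edge [] (by simp) (by simpa using hpre)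
  have hset : PySem.Set.ofList edge = edge := PySem.Set.ofList_eq_self_of_nodup _ hpre
  have hsorted : PySem.List.sorted edge (fun x => x) false = r :=
    PySem.List.sorted_eq_of_perm_of_pairwise_lt edge r (fun x => x) (by simpa using hrp) hrs
  simp [hset, hr, hsorted]
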